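-- pv_equiv track=rewrite | github.com/prosws2210/Chronic-Care-Risk-Prediction-WellDoc | tools/data_tools/lab_result_simulator.py | _determine_test_panels
-- ===== SOURCE A (Python) =====
-- from typing import Dict, Any, List, Optional
--
-- def _determine_test_panels(conditions: List[str]) -> List[str]:
--     """Determine which lab tests to include based on chronic conditions."""
--     panels = ["basic_metabolic"]  # Always include basic panel
--
--     condition_lower = [c.lower() for c in conditions]
--
--     if any(cond in condition_lower for cond in ["diabetes", "type_1", "type_2"]):
--         panels.extend(["diabetes_monitoring", "lipid_panel"])
--
--     if any(cond in condition_lower for cond in ["heart_failure", "cardiovascular", "coronary"]):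
--         panels.extend(["cardiac_markers", "lipid_panel"])
--
--     if "obesity" in condition_lower:
--         panels.extend(["lipid_panel", "diabetes_screening", "liver_function"])
--
--     if any(cond in condition_lower for cond in ["hypertension", "kidney", "renal"]):
--         panels.extend(["kidney_function"])
--
--     if any(cond in condition_lower for cond in ["copd", "inflammatory"]):
--         panels.extend(["inflammatory_markers"])
--
--     # Add routine monitoring
--     panels.append("complete_blood_count")
--
--     return list(set(panels))  # Remove duplicates
-- ===== SOURCE B (Python) =====
-- # Inverted traversal: one pass over the conditions, each lowered condition dispatched through a
-- # dict to a rule index collected in a 'fired' set; panels are then emitted once per fired rule,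
-- # in rule order. A's twelve membership scans of the condition list disappear.
-- _RULE_OF = {
--     "diabetes": 0, "type_1": 0, "type_2": 0,
--     "heart_failure": 1, "cardiovascular": 1, "coronary": 1,
--     "obesity": 2,
--     "hypertension": 3, "kidney": 3, "renal": 3,
--     "copd": 4, "inflammatory": 4,
-- }
-- _RULE_PANELS = [
--     ["diabetes_monitoring", "lipid_panel"],
--     ["cardiac_markers", "lipid_panel"],
--     ["lipid_panel", "diabetes_screening", "liver_function"],
--     ["kidney_function"],
--     ["inflammatory_markers"],
-- ]
--
-- def _determine_test_panels(conditions):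
--     fired = set()
--     for c in conditions:
--         i = _RULE_OF.get(c.lower())
--         if i is not None:
--             fired.add(i)
--     panels = ["basic_metabolic"]
--     for i in sorted(fired):
--         panels += _RULE_PANELS[i]
--     panels.append("complete_blood_count")
--     return list(set(panels))
-- ===== Notes on version B (the rewrite author's own statement) =====
-- stated objective: alternative
-- what changed: Inverts the traversal: instead of A's five branches each scanning the lowered condition list for trigger words (12 scans), B makes one pass over the conditions dispatching each lowered condition through a condition-to-rule-index dict into a 'fired' index set, then emits each fired rule's panels once in sorted rule order.
import Mathlib
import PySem

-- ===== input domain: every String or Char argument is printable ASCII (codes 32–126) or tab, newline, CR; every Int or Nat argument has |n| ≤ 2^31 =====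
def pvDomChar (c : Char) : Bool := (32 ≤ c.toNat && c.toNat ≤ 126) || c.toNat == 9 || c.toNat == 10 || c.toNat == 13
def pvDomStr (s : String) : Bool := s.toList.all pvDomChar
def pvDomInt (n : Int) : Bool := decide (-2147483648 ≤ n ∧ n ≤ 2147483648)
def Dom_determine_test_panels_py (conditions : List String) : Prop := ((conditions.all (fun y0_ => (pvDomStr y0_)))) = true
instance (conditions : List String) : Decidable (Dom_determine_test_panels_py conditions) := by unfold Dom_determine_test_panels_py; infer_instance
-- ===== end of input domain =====

-- B inverts the traversal: one pass over the conditions dispatching each through a dict to a fired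
-- rule-index set, then the fired rules' panels are emitted in sorted index order; objective: alternative.
-- Python returns list(set(panels)) whose order is hash-dependent; the output is compared as a set,
-- so both ports return PySem.Set.ofList of their panels list (distinct elements).

-- ===== PORT A =====
def determine_test_panels_py (conditions : List String) : List String :=
  let panels := ["basic_metabolic"]
  let condition_lower := conditions.map PySem.Str.lower
  let panels := if (["diabetes", "type_1", "type_2"] : List String).any (fun cond => condition_lower.contains cond)
    then panels ++ ["diabetes_monitoring", "lipid_panel"] else panels
  let panels := if (["heart_failure", "cardiovascular", "coronary"] : List String).any (fun cond => condition_lower.contains cond)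
    then panels ++ ["cardiac_markers", "lipid_panel"] else panels
  let panels := if condition_lower.contains "obesity"
    then panels ++ ["lipid_panel", "diabetes_screening", "liver_function"] else panels
  let panels := if (["hypertension", "kidney", "renal"] : List String).any (fun cond => condition_lower.contains cond)
    then panels ++ ["kidney_function"] else panels
  let panels := if (["copd", "inflammatory"] : List String).any (fun cond => condition_lower.contains cond)
    then panels ++ ["inflammatory_markers"] else panels
  let panels := panels ++ ["complete_blood_count"]
  PySem.Set.ofList panels  -- list(set(panels)); output compared as a set

-- ===== PORT B =====
def pvRuleOf : PySem.Dict String Int := PySem.Dict.ofList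
  [("diabetes", 0), ("type_1", 0), ("type_2", 0),
   ("heart_failure", 1), ("cardiovascular", 1), ("coronary", 1),
   ("obesity", 2),
   ("hypertension", 3), ("kidney", 3), ("renal", 3),
   ("copd", 4), ("inflammatory", 4)]

def pvRulePanels : List (List String) :=
  [["diabetes_monitoring", "lipid_panel"],
   ["cardiac_markers", "lipid_panel"],
   ["lipid_panel", "diabetes_screening", "liver_function"],
   ["kidney_function"],
   ["inflammatory_markers"]]

-- the 'fired' set: one pass over the conditions, dict dispatch per condition
def pvFired (conditions : List String) : PySem.Set Int :=
  conditions.foldl (fun s c =>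
    match PySem.Dict.get? pvRuleOf (PySem.Str.lower c) with
    | some i => PySem.Set.add s i
    | none => s) PySem.Set.empty

def determine_test_panels_py_alt (conditions : List String) : List String :=
  let panels := (PySem.List.sorted (pvFired conditions) (fun x => x) false).foldl
    (fun acc i => acc ++ (PySem.List.pyGet? pvRulePanels i).getD []) ["basic_metabolic"]
  PySem.Set.ofList (panels ++ ["complete_blood_count"])  -- list(set(panels)); output compared as a set

-- ===== PRECONDITION & SPEC =====
def Spec_determine_test_panels_py (conditions : List String) (out : List String) : Prop := out = determine_test_panels_py_alt conditions
instance (conditions : List String) (out : List String) : Decidable (Spec_determine_test_panels_py conditions out) := by unfold Spec_determine_test_panels_py; infer_instance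

-- ===== CLAIM (what is proved, stated in full; the proofs are below) =====
def Claim_equal_determine_test_panels_py : Prop := ∀ (conditions : List String), Dom_determine_test_panels_py conditions → Spec_determine_test_panels_py conditions (determine_test_panels_py conditions)

-- ===== LEMMAS AND PROOFS =====

-- membership in the fired set = some condition dispatches to that index
theorem mem_pvFired_aux (l : List String) (s : PySem.Set Int) (y : Int) :
    y ∈ l.foldl (fun s c =>
        match PySem.Dict.get? pvRuleOf (PySem.Str.lower c) with
        | some i => PySem.Set.add s i
        | none => s) s ↔
      y ∈ s ∨ ∃ c ∈ l, PySem.Dict.get? pvRuleOf (PySem.Str.lower c) = some y := by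
  induction l generalizing s with
  | nil => simp
  | cons c t ih =>
    simp only [List.foldl_cons, ih, List.mem_cons]
    cases h : PySem.Dict.get? pvRuleOf (PySem.Str.lower c) with
    | none =>
      constructor
      · rintro (hs | ⟨d, hd, hdy⟩)
        · exact Or.inl hs
        · exact Or.inr ⟨d, Or.inr hd, hdy⟩
      · rintro (hs | ⟨d, (rfl | hd), hdy⟩)
        · exact Or.inl hs
        · rw [h] at hdy; cases hdy
        · exact Or.inr ⟨d, hd, hdy⟩
    | some i =>
      simp only [PySem.Set.mem_add]
      constructor
      · rintro ((hs | rfl) | ⟨d, hd, hdy⟩)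
        · exact Or.inl hs
        · exact Or.inr ⟨c, Or.inl rfl, h⟩
        · exact Or.inr ⟨d, Or.inr hd, hdy⟩
      · rintro (hs | ⟨d, (rfl | hd), hdy⟩)
        · exact Or.inl (Or.inl hs)
        · rw [h] at hdy; exact Or.inl (Or.inr (Option.some.inj hdy).symm)
        · exact Or.inr ⟨d, hd, hdy⟩

theorem mem_pvFired (conditions : List String) (y : Int) :
    y ∈ pvFired conditions ↔ ∃ c ∈ conditions, PySem.Dict.get? pvRuleOf (PySem.Str.lower c) = some y := by
  unfold pvFired
  rw [mem_pvFired_aux]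
  simp [PySem.Set.empty]

theorem nodup_pvFired_aux (l : List String) (s : PySem.Set Int) (hs : s.Nodup) :
    (l.foldl (fun s c =>
        match PySem.Dict.get? pvRuleOf (PySem.Str.lower c) with
        | some i => PySem.Set.add s i
        | none => s) s).Nodup := by
  induction l generalizing s with
  | nil => exact hs
  | cons c t ih =>
    simp only [List.foldl_cons]
    cases h : PySem.Dict.get? pvRuleOf (PySem.Str.lower c) with
    | none => exact ih _ hs
    | some i => exact ih _ (PySem.Set.nodup_add _ _ hs)

theorem nodup_pvFired (conditions : List String) : (pvFired conditions).Nodup :=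
  nodup_pvFired_aux conditions PySem.Set.empty List.nodup_nil

-- the dispatch map, lookup by value: which strings map to each index
set_option maxHeartbeats 1000000 in
theorem get?_pvRuleOf_eq_some_iff (s : String) (i : Int) :
    PySem.Dict.get? pvRuleOf s = some i ↔
      (i = 0 ∧ (s = "diabetes" ∨ s = "type_1" ∨ s = "type_2")) ∨
      (i = 1 ∧ (s = "heart_failure" ∨ s = "cardiovascular" ∨ s = "coronary")) ∨
      (i = 2 ∧ s = "obesity") ∨
      (i = 3 ∧ (s = "hypertension" ∨ s = "kidney" ∨ s = "renal")) ∨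
      (i = 4 ∧ (s = "copd" ∨ s = "inflammatory")) := by
  have hmk : pvRuleOf = PySem.Dict.mk
      [("diabetes", 0), ("type_1", 0), ("type_2", 0),
       ("heart_failure", 1), ("cardiovascular", 1), ("coronary", 1),
       ("obesity", 2),
       ("hypertension", 3), ("kidney", 3), ("renal", 3),
       ("copd", 4), ("inflammatory", 4)] := by rfl
  rw [hmk]
  simp only [PySem.Dict.get?_mk_cons, beq_iff_eq]
  split_ifs <;> subst_eqs <;> try simp_all
  all_goals try omega
  all_goals
    rw [show ({ items := [] } : PySem.Dict String Int).get? s = none from rfl]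
    simp only [reduceCtorEq, false_iff]
    rintro (⟨-, rfl | rfl | rfl⟩ | ⟨-, rfl | rfl | rfl⟩ | ⟨-, rfl⟩ | ⟨-, rfl | rfl | rfl⟩ | ⟨-, rfl | rfl⟩) <;> simp_all

-- every dispatched index is one of 0..4
theorem get?_pvRuleOf_cases (s : String) (i : Int)
    (h : PySem.Dict.get? pvRuleOf s = some i) : i = 0 ∨ i = 1 ∨ i = 2 ∨ i = 3 ∨ i = 4 := by
  rw [get?_pvRuleOf_eq_some_iff] at h
  tauto

-- the sorted fired set is the increasing enumeration of its members among 0..4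
theorem sorted_pvFired (conditions : List String) :
    PySem.List.sorted (pvFired conditions) (fun x => x) false =
      ([0, 1, 2, 3, 4] : List Int).filter (fun i => decide (i ∈ pvFired conditions)) := by
  apply PySem.List.sorted_eq_of_perm_of_pairwise_lt
  · rw [List.perm_ext_iff_of_nodup (List.Nodup.filter _ (by decide)) (nodup_pvFired conditions)]
    intro a
    simp only [List.mem_filter, decide_eq_true_eq, and_iff_right_iff_imp]
    intro ha
    rw [mem_pvFired] at ha
    obtain ⟨c, _, hc⟩ := ha
    rcases get?_pvRuleOf_cases _ _ hc with h | h | h | h | h <;> simp [h]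
  · exact List.Pairwise.filter _ (by decide)

-- A's k-th guard holds iff rule k fired
theorem fired_iff (conditions : List String) (i : Int) :
    i ∈ pvFired conditions ↔
      ∃ c ∈ conditions,
        (i = 0 ∧ (PySem.Str.lower c = "diabetes" ∨ PySem.Str.lower c = "type_1" ∨ PySem.Str.lower c = "type_2")) ∨
        (i = 1 ∧ (PySem.Str.lower c = "heart_failure" ∨ PySem.Str.lower c = "cardiovascular" ∨ PySem.Str.lower c = "coronary")) ∨
        (i = 2 ∧ PySem.Str.lower c = "obesity") ∨
        (i = 3 ∧ (PySem.Str.lower c = "hypertension" ∨ PySem.Str.lower c = "kidney" ∨ PySem.Str.lower c = "renal")) ∨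
        (i = 4 ∧ (PySem.Str.lower c = "copd" ∨ PySem.Str.lower c = "inflammatory")) := by
  rw [mem_pvFired]
  constructor
  · rintro ⟨c, hc, h⟩; exact ⟨c, hc, (get?_pvRuleOf_eq_some_iff _ _).mp h⟩
  · rintro ⟨c, hc, h⟩; exact ⟨c, hc, (get?_pvRuleOf_eq_some_iff _ _).mpr h⟩

-- ===== VERDICT (by name: the statement is the Claim_ definition above) =====
set_option maxHeartbeats 1600000 in
theorem determine_test_panels_py_spec : Claim_equal_determine_test_panels_py := by
  intro conditions _
  unfold Spec_determine_test_panels_py determine_test_panels_py determine_test_panels_py_alt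
  rw [sorted_pvFired]
  have h0 : ((["diabetes", "type_1", "type_2"] : List String).any
      (fun cond => (conditions.map PySem.Str.lower).contains cond)) = true ↔ (0 : Int) ∈ pvFired conditions := by
    rw [fired_iff conditions 0]
    simp [and_or_left, exists_or]
  have h1 : ((["heart_failure", "cardiovascular", "coronary"] : List String).any
      (fun cond => (conditions.map PySem.Str.lower).contains cond)) = true ↔ (1 : Int) ∈ pvFired conditions := by
    rw [fired_iff conditions 1]
    simp [and_or_left, exists_or]
  have h2 : ((conditions.map PySem.Str.lower).contains "obesity") = true ↔ (2 : Int) ∈ pvFired conditions := by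
    rw [fired_iff conditions 2]
    simp [and_or_left]
  have h3 : ((["hypertension", "kidney", "renal"] : List String).any
      (fun cond => (conditions.map PySem.Str.lower).contains cond)) = true ↔ (3 : Int) ∈ pvFired conditions := by
    rw [fired_iff conditions 3]
    simp [and_or_left, exists_or]
  have h4 : ((["copd", "inflammatory"] : List String).any
      (fun cond => (conditions.map PySem.Str.lower).contains cond)) = true ↔ (4 : Int) ∈ pvFired conditions := by
    rw [fired_iff conditions 4]
    simp [and_or_left, exists_or]
  by_cases q0 : (0 : Int) ∈ pvFired conditions <;>
  by_cases q1 : (1 : Int) ∈ pvFired conditions <;>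
  by_cases q2 : (2 : Int) ∈ pvFired conditions <;>
  by_cases q3 : (3 : Int) ∈ pvFired conditions <;>
  by_cases q4 : (4 : Int) ∈ pvFired conditions <;>
  · simp only [h0, h1, h2, h3, h4, q0, q1, q2, q3, q4, List.filter, decide_true, decide_false,
      if_true, if_false, List.foldl_cons, List.foldl_nil]
    try rfl
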